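-- pv_equiv track=rewrite | github.com/nexon33/voynich-grammar-analysis | scripts/phase4/full_sentence_translation_f84v.py | identify_sentence_boundaries
-- ===== SOURCE A (Python) =====
-- def identify_sentence_boundaries(words):
--     """
--     Identify likely sentence boundaries
--
--     Heuristics:
--     - Pronouns often start sentences (daiin, aiin)
--     - Punctuation marks (., !)
--     - Pattern breaks
--     """
--     sentences = []
--     current_sentence = []
--
--     sentence_starters = {"daiin", "aiin", "saiin"}
--
--     for i, word in enumerate(words):
--         current_sentence.append(word)
--
--         # Check for sentence end
--         is_end = False
--
--         # Punctuation
--         if any(c in word for c in [".", "!", "*"]):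
--             is_end = True
--
--         # Next word is sentence starter
--         elif i < len(words) - 1 and words[i + 1] in sentence_starters:
--             is_end = True
--
--         # Long enough and next word is pronoun
--         elif (
--             len(current_sentence) >= 5
--             and i < len(words) - 1
--             and words[i + 1] in sentence_starters
--         ):
--             is_end = True
--
--         if is_end:
--             sentences.append(current_sentence)
--             current_sentence = []
--
--     if current_sentence:
--         sentences.append(current_sentence)
--
--     return sentences
-- ===== SOURCE B (Python) =====
-- def identify_sentence_boundaries(words):
--     """Two-phase: compute break indices, then slice words into contiguous sentences."""
--     sentence_starters = {"daiin", "aiin", "saiin"}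
--     breaks = [
--         i for i, word in enumerate(words)
--         if any(c in word for c in [".", "!", "*"])
--         or (i < len(words) - 1 and words[i + 1] in sentence_starters)
--     ]
--     sentences = []
--     start = 0
--     for b in breaks:
--         sentences.append(words[start:b + 1])
--         start = b + 1
--     if start < len(words):
--         sentences.append(words[start:])
--     return sentences
-- ===== Notes on version B (the rewrite author's own statement) =====
-- stated objective: alternative
-- what changed: Replaces the accumulate-and-flush state machine with a two-phase shape: first compute the list of break indices, then cut words into contiguous slices after each break, appending the trailing remainder if nonempty.
import Mathlib
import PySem

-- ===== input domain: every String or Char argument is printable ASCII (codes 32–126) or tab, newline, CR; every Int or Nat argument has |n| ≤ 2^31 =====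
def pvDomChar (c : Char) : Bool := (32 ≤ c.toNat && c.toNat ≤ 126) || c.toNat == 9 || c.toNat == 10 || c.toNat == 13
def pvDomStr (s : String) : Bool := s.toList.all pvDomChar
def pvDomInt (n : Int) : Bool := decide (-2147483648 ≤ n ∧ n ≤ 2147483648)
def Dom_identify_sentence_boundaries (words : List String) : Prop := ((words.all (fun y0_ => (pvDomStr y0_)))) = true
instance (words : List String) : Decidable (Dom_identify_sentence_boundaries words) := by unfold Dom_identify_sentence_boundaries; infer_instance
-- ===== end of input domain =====

-- B computes the break indices first and then slices; A flushes an accumulator in one pass (alternative decomposition, same cost).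

-- ===== PORT A =====
-- A-side: the accumulate-and-flush loop over enumerate(words), state (sentences, current_sentence).
def identify_sentence_boundaries (words : List String) : List (List String) :=
  let sentence_starters : PySem.Set String := PySem.Set.ofList ["daiin", "aiin", "saiin"]
  let st :=
    (PySem.List.enumerate words 0).foldl
      (fun (st : List (List String) × List String) (iw : Int × String) =>
        let current := st.2 ++ [iw.2]
        let is_end : Bool :=
          if [".", "!", "*"].any (fun c => PySem.Str.isIn c iw.2) then true
          else if decide (iw.1 < (words.length : Int) - 1) &&
                  (PySem.List.pyGet? words (iw.1 + 1)).any
                    (fun w => PySem.Set.contains sentence_starters w) then true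
          else if decide (5 ≤ current.length) &&
                  (decide (iw.1 < (words.length : Int) - 1) &&
                   (PySem.List.pyGet? words (iw.1 + 1)).any
                     (fun w => PySem.Set.contains sentence_starters w)) then true
          else false
        if is_end then (st.1 ++ [current], []) else (st.1, current))
      ([], [])
  if st.2 = [] then st.1 else st.1 ++ [st.2]

-- ===== PORT B =====
-- B-side: filter enumerate(words) for break indices, then cut slices after each break.
def identify_sentence_boundaries_alt (words : List String) : List (List String) :=
  let sentence_starters : PySem.Set String := PySem.Set.ofList ["daiin", "aiin", "saiin"]
  let breaks :=
    ((PySem.List.enumerate words 0).filter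
      (fun (iw : Int × String) =>
        ([".", "!", "*"].any (fun c => PySem.Str.isIn c iw.2)) ||
        (decide (iw.1 < (words.length : Int) - 1) &&
         (PySem.List.pyGet? words (iw.1 + 1)).any
           (fun w => PySem.Set.contains sentence_starters w)))).map (·.1)
  let st :=
    breaks.foldl
      (fun (st : List (List String) × Int) (b : Int) =>
        (st.1 ++ [PySem.List.slice words (some st.2) (some (b + 1))], b + 1))
      ([], 0)
  if decide (st.2 < (words.length : Int)) then
    st.1 ++ [PySem.List.slice words (some st.2) none]
  else st.1

-- ===== PRECONDITION & SPEC =====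
def Spec_identify_sentence_boundaries (words : List String) (out : List (List String)) : Prop := out = identify_sentence_boundaries_alt words
instance (words : List String) (out : List (List String)) : Decidable (Spec_identify_sentence_boundaries words out) := by unfold Spec_identify_sentence_boundaries; infer_instance

-- ===== CLAIM (what is proved, stated in full; the proofs are below) =====
def Claim_equal_identify_sentence_boundaries : Prop := ∀ (words : List String), Dom_identify_sentence_boundaries words → Spec_identify_sentence_boundaries words (identify_sentence_boundaries words)

-- ===== LEMMAS AND PROOFS =====

-- the break predicate both ports test (A's third branch is redundant: it implies the second)
def pvP (words : List String) (iw : Int × String) : Bool :=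
  ([".", "!", "*"].any (fun c => PySem.Str.isIn c iw.2)) ||
  (decide (iw.1 < (words.length : Int) - 1) &&
   (PySem.List.pyGet? words (iw.1 + 1)).any
     (fun w => PySem.Set.contains (PySem.Set.ofList ["daiin", "aiin", "saiin"]) w))

-- A's loop step, with the redundant third branch collapsed
def pvStepA (words : List String) (st : List (List String) × List String) (iw : Int × String) :
    List (List String) × List String :=
  if pvP words iw then (st.1 ++ [st.2 ++ [iw.2]], []) else (st.1, st.2 ++ [iw.2])

-- common reference: split the enumerated suffix at the break predicate
def pvSplit (words : List String) (cur : List String) : List (Int × String) → List (List String)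
  | [] => if cur = [] then [] else [cur]
  | iw :: rest =>
      if pvP words iw then (cur ++ [iw.2]) :: pvSplit words [] rest
      else pvSplit words (cur ++ [iw.2]) rest

theorem pvIsEnd_eq (a b l : Bool) :
    (if a then true else if b then true else if l && b then true else false) = (a || b) := by
  cases a <;> cases b <;> cases l <;> rfl

theorem pvStepA_eq (words : List String) :
    (fun (st : List (List String) × List String) (iw : Int × String) =>
        let current := st.2 ++ [iw.2]
        let is_end : Bool :=
          if [".", "!", "*"].any (fun c => PySem.Str.isIn c iw.2) then true
          else if decide (iw.1 < (words.length : Int) - 1) &&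
                  (PySem.List.pyGet? words (iw.1 + 1)).any
                    (fun w => PySem.Set.contains (PySem.Set.ofList ["daiin", "aiin", "saiin"]) w) then true
          else if decide (5 ≤ current.length) &&
                  (decide (iw.1 < (words.length : Int) - 1) &&
                   (PySem.List.pyGet? words (iw.1 + 1)).any
                     (fun w => PySem.Set.contains (PySem.Set.ofList ["daiin", "aiin", "saiin"]) w)) then true
          else false
        if is_end then (st.1 ++ [current], []) else (st.1, current))
    = pvStepA words := by
  funext st iw
  simp only [pvStepA, pvP, pvIsEnd_eq]
  rfl

theorem pvA_inv (words : List String) :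
    ∀ (l : List (Int × String)) (acc : List (List String)) (cur : List String),
      (if (l.foldl (pvStepA words) (acc, cur)).2 = [] then (l.foldl (pvStepA words) (acc, cur)).1
       else (l.foldl (pvStepA words) (acc, cur)).1 ++ [(l.foldl (pvStepA words) (acc, cur)).2])
      = acc ++ pvSplit words cur l := by
  intro l
  induction l with
  | nil =>
      intro acc cur
      simp only [List.foldl_nil, pvSplit]
      by_cases h : cur = [] <;> simp [h]
  | cons iw rest ih =>
      intro acc cur
      simp only [List.foldl_cons, pvSplit]
      by_cases hp : pvP words iw
      · simp only [pvStepA, if_pos hp, ih]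
        simp
      · simp only [pvStepA, if_neg hp, ih]

theorem pvB_inv (words : List String) :
    ∀ (t : List String) (k s : Nat) (acc : List (List String)),
      t = words.drop k → s ≤ k →
      (if decide (((((PySem.List.enumerate t (k : Int)).filter (pvP words)).map (·.1)).foldl
            (fun (st : List (List String) × Int) (b : Int) =>
              (st.1 ++ [PySem.List.slice words (some st.2) (some (b + 1))], b + 1))
            (acc, (s : Int))).2 < (words.length : Int)) then
         ((((PySem.List.enumerate t (k : Int)).filter (pvP words)).map (·.1)).foldl
            (fun (st : List (List String) × Int) (b : Int) =>
              (st.1 ++ [PySem.List.slice words (some st.2) (some (b + 1))], b + 1))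
            (acc, (s : Int))).1 ++
          [PySem.List.slice words
            (some (((((PySem.List.enumerate t (k : Int)).filter (pvP words)).map (·.1)).foldl
              (fun (st : List (List String) × Int) (b : Int) =>
                (st.1 ++ [PySem.List.slice words (some st.2) (some (b + 1))], b + 1))
              (acc, (s : Int))).2)) none]
       else
         ((((PySem.List.enumerate t (k : Int)).filter (pvP words)).map (·.1)).foldl
            (fun (st : List (List String) × Int) (b : Int) =>
              (st.1 ++ [PySem.List.slice words (some st.2) (some (b + 1))], b + 1))
            (acc, (s : Int))).1)
      = acc ++ pvSplit words ((words.drop s).take (k - s)) (PySem.List.enumerate t (k : Int)) := by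
  intro t
  induction t with
  | nil =>
      intro k s acc ht hs
      have hk : words.length ≤ k := by
        have := congrArg List.length ht
        simp [List.length_drop] at this
        omega
      have hcur : (words.drop s).take (k - s) = words.drop s := by
        apply List.take_of_length_le
        simp [List.length_drop]; omega
      simp only [PySem.List.enumerate_nil, List.filter_nil, List.map_nil, List.foldl_nil, pvSplit,
        hcur]
      by_cases hsl : s < words.length
      · have h1 : ((s : Int) < (words.length : Int)) := by exact_mod_cast hsl
        have h2 : words.drop s ≠ [] := by
          simp [List.drop_eq_nil_iff]; omega
        rw [if_pos (by simpa using h1), if_neg h2, PySem.List.slice_from words (Int.natCast_nonneg s)]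
        simp
      · have h1 : ¬ ((s : Int) < (words.length : Int)) := by exact_mod_cast hsl
        have h2 : words.drop s = [] := by
          simp [List.drop_eq_nil_iff]; omega
        rw [if_neg (by simpa using h1), if_pos h2]
        exact (List.append_nil acc).symm
  | cons w t' ih =>
      intro k s acc ht hs
      have hkw : words[k]? = some w := by
        have := congrArg List.head? ht
        simpa [List.head?_drop] using this.symm
      have ht' : t' = words.drop (k + 1) := by
        have := congrArg List.tail ht
        simpa [List.tail_drop] using this
      have hcast : (k : Int) + 1 = ((k + 1 : Nat) : Int) := by push_cast; ring
      have hext : (words.drop s).take (k + 1 - s) = (words.drop s).take (k - s) ++ [w] := by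
        have h1 : k + 1 - s = (k - s) + 1 := by omega
        rw [h1, List.take_add_one]
        have h2 : (words.drop s)[k - s]? = some w := by
          rw [List.getElem?_drop]
          have h3 : s + (k - s) = k := by omega
          rw [h3]; exact hkw
        simp [h2]
      have hslice : PySem.List.slice words (some (s : Int)) (some ((k : Int) + 1))
          = (words.drop s).take (k - s) ++ [w] := by
        rw [hcast, PySem.List.slice_natCast]
        exact hext
      rw [PySem.List.enumerate_cons]
      simp only [pvSplit]
      by_cases hp : pvP words ((k : Int), w)
      · rw [if_pos hp]
        simp only [List.filter_cons, hp, reduceIte, List.map_cons, List.foldl_cons]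
        rw [hcast] at hslice
        rw [hcast, hslice]
        have h4 := ih (k + 1) (k + 1) (acc ++ [(words.drop s).take (k - s) ++ [w]]) ht' (le_refl _)
        simp only [Nat.sub_self, List.take_zero] at h4
        rw [h4]
        simp
      · rw [if_neg hp]
        have hp' : pvP words ((k : Int), w) = false := by
          simpa using hp
        simp only [List.filter_cons, hp', Bool.false_eq_true, if_false]
        have h4 := ih (k + 1) s acc ht' (by omega)
        rw [hcast, h4, hext]

-- ===== VERDICT (by name: the statement is the Claim_ definition above) =====
theorem identify_sentence_boundaries_spec : Claim_equal_identify_sentence_boundaries := by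
  intro words _
  show identify_sentence_boundaries words = identify_sentence_boundaries_alt words
  have hB : identify_sentence_boundaries_alt words
      = [] ++ pvSplit words ((words.drop 0).take (0 - 0)) (PySem.List.enumerate words ((0 : Nat) : Int)) :=
    pvB_inv words words 0 0 [] rfl (Nat.le_refl 0)
  rw [hB]
  simp only [identify_sentence_boundaries]
  rw [pvStepA_eq]
  exact pvA_inv words (PySem.List.enumerate words 0) [] []
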